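-- pv_equiv track=rewrite | github.com/linda-oranya/Algorithms | basic_algorithms/find_element.py | find_element_binary
-- ===== SOURCE A (Python) =====
-- def find_element_binary(nums, target):  # [1, 1, 1, 5, 6, 9, 10, 15, 19, 91], 1
--     min_index = 0  # 0
--     max_index = len(nums) - 1  # 9
--     initial = -1  # 0
--     while min_index <= max_index:   # 0 <= -1
--         mid = (min_index + max_index) // 2  # 0
--         if nums[mid] == target:  # yes
--             initial = mid
--             max_index = mid - 1
--         elif nums[mid] > target:  # 6 > 1
--             max_index = mid - 1   # 4 - 1
--         else:
--             min_index = mid + 1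
--
--     min_index = 0
--     max_index = len(nums) - 1
--     last = -1
--     while min_index <= max_index:
--         mid = (min_index + max_index) // 2
--         if nums[mid] == target:
--             last = mid
--             min_index = mid + 1
--         elif nums[mid] > target:
--             max_index = mid - 1
--         else:
--             min_index = mid + 1
--     return [initial, last]
-- ===== SOURCE B (Python) =====
-- def find_element_binary(nums, target):
--     def search(lo, hi, go_left):
--         if lo > hi:
--             return -1
--         mid = (lo + hi) // 2
--         if nums[mid] == target:
--             r = search(lo, mid - 1, go_left) if go_left else search(mid + 1, hi, go_left)
--             return r if r >= 0 else mid
--         elif nums[mid] > target: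
--             return search(lo, mid - 1, go_left)
--         else:
--             return search(mid + 1, hi, go_left)
--     n = len(nums) - 1
--     return [search(0, n, True), search(0, n, False)]
-- ===== Notes on version B (the rewrite author's own statement) =====
-- stated objective: alternative
-- what changed: Replaces A's two iterative while-loops with accumulator variables by a single recursive binary-search helper parameterised by direction, which returns the deeper match index (or -1) instead of maintaining mutable state.
import Mathlib
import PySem

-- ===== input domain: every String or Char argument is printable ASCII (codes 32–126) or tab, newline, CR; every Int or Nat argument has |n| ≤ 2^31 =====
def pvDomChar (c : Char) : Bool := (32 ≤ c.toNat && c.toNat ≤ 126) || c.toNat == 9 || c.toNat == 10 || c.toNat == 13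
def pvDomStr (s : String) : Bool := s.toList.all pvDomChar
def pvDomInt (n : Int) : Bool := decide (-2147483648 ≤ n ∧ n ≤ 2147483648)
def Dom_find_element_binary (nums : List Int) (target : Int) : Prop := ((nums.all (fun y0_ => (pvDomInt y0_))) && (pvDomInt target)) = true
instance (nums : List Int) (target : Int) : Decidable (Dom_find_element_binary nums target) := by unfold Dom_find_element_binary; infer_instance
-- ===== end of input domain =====

-- B replaces A's two while-loops with one direction-parameterised recursive binary-search helper (alternative decomposition, same cost).

-- ===== PORT A =====
-- first while-loop of A: records a match in `acc` and continues left
def pvLoopFirst (nums : List Int) (target : Int) (lo hi acc : Int) : Int :=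
  if h : lo ≤ hi then
    let mid := PySem.Int.floordiv (lo + hi) 2
    match PySem.List.pyGet? nums mid with
    | none => acc  -- IndexError; unreachable for A's initial bounds
    | some v =>
      if v = target then pvLoopFirst nums target lo (mid - 1) mid
      else if v > target then pvLoopFirst nums target lo (mid - 1) acc
      else pvLoopFirst nums target (mid + 1) hi acc
  else acc
termination_by (hi + 1 - lo).toNat
decreasing_by all_goals (have := PySem.Int.floordiv_two_mid_bounds h; omega)

-- second while-loop of A: records a match in `acc` and continues right
def pvLoopLast (nums : List Int) (target : Int) (lo hi acc : Int) : Int :=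
  if h : lo ≤ hi then
    let mid := PySem.Int.floordiv (lo + hi) 2
    match PySem.List.pyGet? nums mid with
    | none => acc  -- IndexError; unreachable for A's initial bounds
    | some v =>
      if v = target then pvLoopLast nums target (mid + 1) hi mid
      else if v > target then pvLoopLast nums target lo (mid - 1) acc
      else pvLoopLast nums target (mid + 1) hi acc
  else acc
termination_by (hi + 1 - lo).toNat
decreasing_by all_goals (have := PySem.Int.floordiv_two_mid_bounds h; omega)

def find_element_binary (nums : List Int) (target : Int) : List Int :=
  [pvLoopFirst nums target 0 ((nums.length : Int) - 1) (-1),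
   pvLoopLast nums target 0 ((nums.length : Int) - 1) (-1)]

-- ===== PORT B =====
-- recursive helper `search(lo, hi, go_left)` of Source B
def pvSearch (nums : List Int) (target : Int) (lo hi : Int) (goLeft : Bool) : Int :=
  if h : lo > hi then -1
  else
    let mid := PySem.Int.floordiv (lo + hi) 2
    match PySem.List.pyGet? nums mid with
    | none => -1  -- IndexError; unreachable for Source B's initial bounds
    | some v =>
      if v = target then
        let r := if goLeft then pvSearch nums target lo (mid - 1) goLeft
                 else pvSearch nums target (mid + 1) hi goLeft
        if r ≥ 0 then r else mid
      else if v > target then pvSearch nums target lo (mid - 1) goLeft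
      else pvSearch nums target (mid + 1) hi goLeft
termination_by (hi + 1 - lo).toNat
decreasing_by all_goals (have := PySem.Int.floordiv_two_mid_bounds (by omega : lo ≤ hi); omega)

def find_element_binary_alt (nums : List Int) (target : Int) : List Int :=
  let n := (nums.length : Int) - 1
  [pvSearch nums target 0 n true, pvSearch nums target 0 n false]

-- ===== PRECONDITION & SPEC =====
def Spec_find_element_binary (nums : List Int) (target : Int) (out : List Int) : Prop := out = find_element_binary_alt nums target
instance (nums : List Int) (target : Int) (out : List Int) : Decidable (Spec_find_element_binary nums target out) := by unfold Spec_find_element_binary; infer_instance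

-- ===== CLAIM (what is proved, stated in full; the proofs are below) =====
def Claim_equal_find_element_binary : Prop := ∀ (nums : List Int) (target : Int), Dom_find_element_binary nums target → Spec_find_element_binary nums target (find_element_binary nums target)

-- ===== LEMMAS AND PROOFS =====

lemma pvLoopFirst_eq_search (nums : List Int) (target : Int) :
    ∀ n lo hi acc, (hi + 1 - lo).toNat ≤ n → 0 ≤ lo →
      pvLoopFirst nums target lo hi acc =
        (if pvSearch nums target lo hi true ≥ 0 then pvSearch nums target lo hi true else acc) := by
  intro n
  induction n with
  | zero =>
    intro lo hi acc hn hlo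
    rw [pvLoopFirst.eq_def, pvSearch.eq_def]
    have : ¬ lo ≤ hi := by omega
    simp [this, show lo > hi by omega]
  | succ n ih =>
    intro lo hi acc hn hlo
    rw [pvLoopFirst.eq_def, pvSearch.eq_def]
    by_cases h : lo ≤ hi
    · have hmid := PySem.Int.floordiv_two_mid_bounds h
      simp only [h, dif_pos, show ¬ lo > hi by omega, dif_neg, not_false_iff]
      set mid := PySem.Int.floordiv (lo + hi) 2 with hmiddef
      cases hget : PySem.List.pyGet? nums mid with
      | none => simp
      | some v =>
        simp only
        by_cases hv : v = target
        · simp only [hv, if_true]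
          rw [ih lo (mid - 1) mid (by omega) hlo]
          by_cases hr : pvSearch nums target lo (mid - 1) true ≥ 0
          · simp [hr]
          · have h0 : (0:Int) ≤ mid := by omega
            simp [hr, h0]
        · simp only [hv, if_false]
          by_cases hgt : v > target
          · simp only [hgt, if_true]
            exact ih lo (mid - 1) acc (by omega) hlo
          · simp only [hgt, if_false]
            exact ih (mid + 1) hi acc (by omega) (by omega)
    · simp [h, show lo > hi by omega]

lemma pvLoopLast_eq_search (nums : List Int) (target : Int) :
    ∀ n lo hi acc, (hi + 1 - lo).toNat ≤ n → 0 ≤ lo →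
      pvLoopLast nums target lo hi acc =
        (if pvSearch nums target lo hi false ≥ 0 then pvSearch nums target lo hi false else acc) := by
  intro n
  induction n with
  | zero =>
    intro lo hi acc hn hlo
    rw [pvLoopLast.eq_def, pvSearch.eq_def]
    have : ¬ lo ≤ hi := by omega
    simp [this, show lo > hi by omega]
  | succ n ih =>
    intro lo hi acc hn hlo
    rw [pvLoopLast.eq_def, pvSearch.eq_def]
    by_cases h : lo ≤ hi
    · have hmid := PySem.Int.floordiv_two_mid_bounds h
      simp only [h, dif_pos, show ¬ lo > hi by omega, dif_neg, not_false_iff]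
      set mid := PySem.Int.floordiv (lo + hi) 2 with hmiddef
      cases hget : PySem.List.pyGet? nums mid with
      | none => simp
      | some v =>
        simp only
        by_cases hv : v = target
        · simp only [hv, if_true]
          rw [ih (mid + 1) hi mid (by omega) (by omega)]
          by_cases hr : pvSearch nums target (mid + 1) hi false ≥ 0
          · simp [hr]
          · have h0 : (0:Int) ≤ mid := by omega
            simp [hr, h0]
        · simp only [hv, if_false]
          by_cases hgt : v > target
          · simp only [hgt, if_true]
            exact ih lo (mid - 1) acc (by omega) hlo
          · simp only [hgt, if_false]
            exact ih (mid + 1) hi acc (by omega) (by omega)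
    · simp [h, show lo > hi by omega]

lemma pvSearch_neg_eq (nums : List Int) (target : Int) :
    ∀ n lo hi goLeft, (hi + 1 - lo).toNat ≤ n → 0 ≤ lo →
      pvSearch nums target lo hi goLeft = -1 ∨ 0 ≤ pvSearch nums target lo hi goLeft := by
  intro n
  induction n with
  | zero =>
    intro lo hi goLeft hn hlo
    rw [pvSearch.eq_def]
    simp [show lo > hi by omega]
  | succ n ih =>
    intro lo hi goLeft hn hlo
    rw [pvSearch.eq_def]
    by_cases h : lo > hi
    · simp [h]
    · have hmid := PySem.Int.floordiv_two_mid_bounds (by omega : lo ≤ hi)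
      simp only [h, dif_neg, not_false_iff]
      set mid := PySem.Int.floordiv (lo + hi) 2 with hmiddef
      cases hget : PySem.List.pyGet? nums mid with
      | none => simp
      | some v =>
        simp only
        by_cases hv : v = target
        · simp only [hv, if_true]
          by_cases hr : (if goLeft then pvSearch nums target lo (mid - 1) goLeft
                         else pvSearch nums target (mid + 1) hi goLeft) ≥ 0
          · right; simpa [hr] using hr
          · right; simp [hr]; omega
        · simp only [hv, if_false]
          by_cases hgt : v > target
          · simp only [hgt, if_true]
            exact ih lo (mid - 1) goLeft (by omega) hlo
          · simp only [hgt, if_false]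
            exact ih (mid + 1) hi goLeft (by omega) (by omega)

-- ===== VERDICT (by name: the statement is the Claim_ definition above) =====
theorem find_element_binary_spec : Claim_equal_find_element_binary := by
  intro nums target _
  unfold Spec_find_element_binary find_element_binary find_element_binary_alt
  rw [pvLoopFirst_eq_search nums target ((nums.length : Int) - 1 + 1 - 0).toNat 0 _ _ le_rfl (le_refl 0),
      pvLoopLast_eq_search nums target ((nums.length : Int) - 1 + 1 - 0).toNat 0 _ _ le_rfl (le_refl 0)]
  simp only []
  have e1 := pvSearch_neg_eq nums target ((nums.length : Int) - 1 + 1 - 0).toNat 0 ((nums.length : Int) - 1) true le_rfl (le_refl 0)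
  have e2 := pvSearch_neg_eq nums target ((nums.length : Int) - 1 + 1 - 0).toNat 0 ((nums.length : Int) - 1) false le_rfl (le_refl 0)
  by_cases h1 : pvSearch nums target 0 ((nums.length : Int) - 1) true ≥ 0 <;>
  by_cases h2 : pvSearch nums target 0 ((nums.length : Int) - 1) false ≥ 0 <;>
    simp [h1, h2] <;> omega
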